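-- pv_equiv track=rewrite | github.com/Xuniverzadmin/agenticverz_2.0 | scripts/ops/hoc_spine_study_validator.py | detect_transaction_usage
-- ===== SOURCE A (Python) =====
-- def detect_transaction_usage(source: str) -> dict[str, bool]:
--     """Detect session.commit(), session.flush(), session.rollback() in source code lines (not comments)."""
--     commits = False
--     flushes = False
--     rollbacks = False
--     for line in source.splitlines():
--         stripped = line.strip()
--         if stripped.startswith("#"):
--             continue
--         # Remove inline comments
--         code_part = stripped.split("#")[0]
--         if ".commit()" in code_part:
--             commits = True
--         if ".flush()" in code_part:
--             flushes = True
--         if ".rollback()" in code_part: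
--             rollbacks = True
--     return {
--         "commits": commits,
--         "flushes": flushes,
--         "rollbacks": rollbacks,
--     }
-- ===== SOURCE B (Python) =====
-- def detect_transaction_usage(source: str) -> dict[str, bool]:
--     """Detect session.commit(), session.flush(), session.rollback() in source code lines (not comments)."""
--     commits = False
--     flushes = False
--     rollbacks = False
--     in_comment = False
--     window = ""
--     for ch in source:
--         if ch == "\n" or ch == "\r":
--             in_comment = False
--             window = ""
--         elif in_comment:
--             continue
--         elif ch == "#":
--             in_comment = True
--         else:
--             window = (window + ch)[-11:]
--             if window.endswith(".commit()"):
--                 commits = True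
--             if window.endswith(".flush()"):
--                 flushes = True
--             if window.endswith(".rollback()"):
--                 rollbacks = True
--     return {
--         "commits": commits,
--         "flushes": flushes,
--         "rollbacks": rollbacks,
--     }
-- ===== Notes on version B (the rewrite author's own statement) =====
-- stated objective: alternative
-- what changed: Instead of splitting the source into lines and running strip/startswith/split('#') string operations on each line, B makes a single character-level streaming pass with an in_comment flag and an 11-character sliding window, testing the three patterns by endswith on the window.
import Mathlib
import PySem

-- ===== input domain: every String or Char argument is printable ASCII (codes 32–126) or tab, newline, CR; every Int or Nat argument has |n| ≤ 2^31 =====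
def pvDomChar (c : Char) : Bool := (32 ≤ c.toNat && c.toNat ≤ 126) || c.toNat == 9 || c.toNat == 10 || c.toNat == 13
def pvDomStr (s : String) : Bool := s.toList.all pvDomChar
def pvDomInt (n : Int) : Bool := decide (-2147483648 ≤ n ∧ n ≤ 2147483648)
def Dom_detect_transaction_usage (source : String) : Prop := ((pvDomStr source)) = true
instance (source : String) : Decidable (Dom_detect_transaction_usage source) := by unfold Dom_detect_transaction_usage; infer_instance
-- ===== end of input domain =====

-- B replaces A's line-splitting loop (splitlines + strip + split('#') per line) by a single
-- character-level streaming scanner with a comment flag and an 11-char sliding window (alternative algorithm).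


-- ===== PORT A =====
-- A-side helper: the body of A's for-loop, updating the three flags.
-- stripped.split("#")[0]: split with a nonempty separator always returns a nonempty list,
-- so [0] never raises; ported as .headD "".
def pvStepA (st : Bool × Bool × Bool) (line : String) : Bool × Bool × Bool :=
  let stripped := PySem.Str.strip line
  if PySem.Str.startswith stripped "#" then st
  else
    let code_part := ((PySem.Str.split? stripped "#").getD []).headD ""
    let commits := if PySem.Str.isIn ".commit()" code_part then true else st.1
    let flushes := if PySem.Str.isIn ".flush()" code_part then true else st.2.1
    let rollbacks := if PySem.Str.isIn ".rollback()" code_part then true else st.2.2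
    (commits, flushes, rollbacks)

def detect_transaction_usage (source : String) : List (String × Bool) :=
  let st := (PySem.Str.splitlines source).foldl pvStepA (false, false, false)
  [("commits", st.1), ("flushes", st.2.1), ("rollbacks", st.2.2)]

-- ===== PORT B =====
-- B-side helper: the body of B's for-ch loop; state = (commits, flushes, rollbacks, in_comment, window).
-- String ops on the window are ported on the code-point list ((w+ch)[-11:] = PySem.List.slice … (-11) none,
-- .endswith = PySem.Chars.endswith); exact on all inputs.
def pvStepB (st : Bool × Bool × Bool × Bool × List Char) (ch : Char) :
    Bool × Bool × Bool × Bool × List Char :=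
  if ch = '\n' ∨ ch = '\r' then (st.1, st.2.1, st.2.2.1, false, [])
  else if st.2.2.2.1 then st
  else if ch = '#' then (st.1, st.2.1, st.2.2.1, true, st.2.2.2.2)
  else
    let w := PySem.List.slice (st.2.2.2.2 ++ [ch]) (some (-11)) none
    (if PySem.Chars.endswith w ".commit()".toList then true else st.1,
     if PySem.Chars.endswith w ".flush()".toList then true else st.2.1,
     if PySem.Chars.endswith w ".rollback()".toList then true else st.2.2.1,
     false, w)

def detect_transaction_usage_alt (source : String) : List (String × Bool) :=
  let st := source.toList.foldl pvStepB (false, false, false, false, [])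
  [("commits", st.1), ("flushes", st.2.1), ("rollbacks", st.2.2.1)]

-- ===== PRECONDITION & SPEC =====
def Spec_detect_transaction_usage (source : String) (out : List (String × Bool)) : Prop := out = detect_transaction_usage_alt source
instance (source : String) (out : List (String × Bool)) : Decidable (Spec_detect_transaction_usage source out) := by unfold Spec_detect_transaction_usage; infer_instance

-- ===== CLAIM (what is proved, stated in full; the proofs are below) =====
def Claim_equal_detect_transaction_usage : Prop := ∀ (source : String), Dom_detect_transaction_usage source → Spec_detect_transaction_usage source (detect_transaction_usage source)

-- ===== LEMMAS AND PROOFS =====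

-- code part of a line: everything before the first '#'
def pvCut (l : List Char) : List Char := l.takeWhile (fun c => c != '#')

-- the lines of a character stream, splitting at every '\n' and every '\r' (always nonempty)
def pvLines : List Char → List (List Char)
  | [] => [[]]
  | c :: t => if c = '\n' ∨ c = '\r' then [] :: pvLines t
              else (c :: (pvLines t).headI) :: (pvLines t).tail

-- the last (at most) 11 characters
def pvWin (x : List Char) : List Char := x.drop (x.length - 11)

-- B's scanner, tracking only whether pattern p fires (state: in_comment, window)
def pvScan (p : List Char) : Bool → List Char → List Char → Bool
  | _, _, [] => false
  | ic, w, c :: t =>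
    if c = '\n' ∨ c = '\r' then pvScan p false [] t
    else if ic then pvScan p ic w t
    else if c = '#' then pvScan p true w t
    else PySem.Chars.endswith (pvWin (w ++ [c])) p || pvScan p false (pvWin (w ++ [c])) t

-- the same scanner keeping the whole code prefix of the current line instead of the window
def pvScanF (p : List Char) : Bool → List Char → List Char → Bool
  | _, _, [] => false
  | ic, u, c :: t =>
    if c = '\n' ∨ c = '\r' then pvScanF p false [] t
    else if ic then pvScanF p ic u t
    else if c = '#' then pvScanF p true u t
    else PySem.Chars.endswith (u ++ [c]) p || pvScanF p false (u ++ [c]) t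

-- matches of p ending strictly inside m, after already-seen prefix u
def pvG (p : List Char) : List Char → List Char → Bool
  | _, [] => false
  | u, c :: t => PySem.Chars.endswith (u ++ [c]) p || pvG p (u ++ [c]) t

-- the (in_comment, window) component of B's fold
def pvCW : Bool × List Char → List Char → Bool × List Char
  | st, [] => st
  | (ic, w), c :: t =>
    if c = '\n' ∨ c = '\r' then pvCW (false, []) t
    else if ic then pvCW (ic, w) t
    else if c = '#' then pvCW (true, w) t
    else pvCW (false, pvWin (w ++ [c])) t

theorem pvSliceWin (x : List Char) : PySem.List.slice x (some (-11)) none = pvWin x := by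
  rw [PySem.List.slice_from_neg_ofNat x 11 (by omega)]; rfl

-- B's fold = three independent scanners plus the (in_comment, window) state
theorem pvFoldB (cs : List Char) : ∀ (a b c ic : Bool) (w : List Char),
    cs.foldl pvStepB (a, b, c, ic, w) =
      (a || pvScan ".commit()".toList ic w cs,
       b || pvScan ".flush()".toList ic w cs,
       c || pvScan ".rollback()".toList ic w cs,
       pvCW (ic, w) cs) := by
  intro a b c ic w
  induction cs generalizing a b c ic w with
  | nil => simp [pvScan, pvCW]
  | cons x t ih =>
    simp only [List.foldl_cons, pvStepB, pvSliceWin]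
    by_cases h1 : x = '\n' ∨ x = '\r' <;> rcases ic with _ | _ <;> by_cases h3 : x = '#' <;>
      simp [h1, h3, ih, pvScan, pvCW, Bool.or_comm, Bool.or_left_comm]

-- window adequacy: an 11-char window decides endswith for patterns of length ≤ 11
theorem pvWin_append (u : List Char) (c : Char) :
    pvWin (pvWin u ++ [c]) = pvWin (u ++ [c]) := by
  have h1 : pvWin u ++ [c] = (u ++ [c]).drop (u.length - 11) := by
    rw [List.drop_append_of_le_length (by omega)]; rfl
  rw [pvWin, h1, List.drop_drop]
  unfold pvWin
  congr 1
  simp [List.length_drop]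
  omega

theorem pvEndswith_win (p x : List Char) (hp : p.length ≤ 11) :
    PySem.Chars.endswith (pvWin x) p = PySem.Chars.endswith x p := by
  rw [Bool.eq_iff_iff, PySem.Chars.endswith_iff, PySem.Chars.endswith_iff]
  constructor
  · exact fun h => h.trans (List.drop_suffix _ _)
  · rintro ⟨s, rfl⟩
    rw [pvWin, List.length_append, List.drop_append_of_le_length (by omega)]
    exact List.suffix_append _ _

theorem pvScan_eq_scanF (p : List Char) (hp : p.length ≤ 11) :
    ∀ (cs : List Char) (ic : Bool) (u : List Char),
      pvScan p ic (pvWin u) cs = pvScanF p ic u cs := by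
  intro cs
  induction cs with
  | nil => intro ic u; rfl
  | cons x t ih =>
    intro ic u
    by_cases h1 : x = '\n' ∨ x = '\r' <;> rcases ic with _ | _ <;> by_cases h3 : x = '#' <;>
      simp only [pvScan, pvScanF, h1, h3, if_true, if_false, Bool.false_eq_true]
    all_goals try exact ih _ _
    all_goals try { have := ih false []; simpa [pvWin] using this }
    · rw [pvWin_append, pvEndswith_win _ _ hp, ih false (u ++ [x])]

-- suffix-of-a-prefix characterisation of infix
theorem pvInfix_iff (p m : List Char) : p <:+: m ↔ ∃ t, t <+: m ∧ p <:+ t := by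
  constructor
  · intro h
    rcases List.infix_iff_prefix_suffix.mp (List.reverse_infix.mpr h) with ⟨t, hpt, hts⟩
    refine ⟨t.reverse, List.reverse_suffix.mp (by simpa using hts), ?_⟩
    exact List.reverse_prefix.mp (by simpa using hpt)
  · rintro ⟨t, hpt, hts⟩
    exact hts.isInfix.trans hpt.isInfix

theorem pvG_iff (p : List Char) : ∀ (m u : List Char),
    pvG p u m = true ↔ ∃ v, v <+: m ∧ v ≠ [] ∧ p <:+ u ++ v := by
  intro m
  induction m with
  | nil => intro u; simp [pvG]
  | cons c t ih =>
    intro u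
    simp only [pvG, Bool.or_eq_true, PySem.Chars.endswith_iff, ih]
    constructor
    · rintro (h | ⟨v, hv, hne, hsuf⟩)
      · exact ⟨[c], ⟨t, rfl⟩, by simp, h⟩
      · exact ⟨c :: v, List.cons_prefix_cons.mpr ⟨rfl, hv⟩, by simp, by simpa using hsuf⟩
    · rintro ⟨v, hv, hne, hsuf⟩
      cases v with
      | nil => exact absurd rfl hne
      | cons d v' =>
        obtain ⟨rfl, hv'⟩ := List.cons_prefix_cons.mp hv
        cases v' with
        | nil => exact Or.inl (by simpa using hsuf)
        | cons e v'' =>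
          exact Or.inr ⟨e :: v'', hv', by simp, by simpa using hsuf⟩

theorem pvG_nil_eq_isIn (p m : List Char) (hp : p ≠ []) :
    pvG p [] m = PySem.Chars.isIn p m := by
  rw [Bool.eq_iff_iff, pvG_iff, PySem.Chars.isIn_iff_infix, pvInfix_iff]
  constructor
  · rintro ⟨v, hv, _, hsuf⟩
    exact ⟨v, hv, by simpa using hsuf⟩
  · rintro ⟨t, ht, hsuf⟩
    refine ⟨t, ht, ?_, by simpa using hsuf⟩
    rintro rfl
    rw [List.suffix_nil] at hsuf
    exact hp hsuf

theorem pvLines_ne_nil (cs : List Char) : pvLines cs ≠ [] := by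
  cases cs with
  | nil => simp [pvLines]
  | cons c t => simp only [pvLines]; split <;> simp

theorem pvLines_any (cs : List Char) (f : List Char → Bool) :
    (pvLines cs).any f = (f (pvLines cs).headI || (pvLines cs).tail.any f) := by
  rcases h : pvLines cs with _ | ⟨l, T⟩
  · exact absurd h (pvLines_ne_nil cs)
  · simp

-- the full-prefix scanner computes the per-line matches
theorem pvScanF_lines (p : List Char) (hp : p ≠ []) :
    ∀ (cs u : List Char),
      (pvScanF p false u cs =
        (pvG p u (pvCut (pvLines cs).headI) ||
          (pvLines cs).tail.any (fun l => PySem.Chars.isIn p (pvCut l)))) ∧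
      (pvScanF p true u cs = (pvLines cs).tail.any (fun l => PySem.Chars.isIn p (pvCut l))) := by
  intro cs
  induction cs with
  | nil => intro u; simp [pvScanF, pvLines, pvCut, pvG]
  | cons c t ih =>
    intro u
    by_cases h1 : c = '\n' ∨ c = '\r'
    · have hmain : pvScanF p false [] t =
          (pvLines t).any (fun l => PySem.Chars.isIn p (pvCut l)) := by
        rw [(ih []).1, pvG_nil_eq_isIn _ _ hp, pvLines_any t]
      constructor <;>
        simp [pvScanF, pvLines, h1, pvCut, pvG, hmain]
    · by_cases h3 : c = '#'
      · subst h3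
        constructor <;>
          simp [pvScanF, pvLines, pvCut, pvG, (ih u).2]
      · constructor
        · simp only [pvScanF, h1, if_false, Bool.false_eq_true, h3]
          rw [(ih (u ++ [c])).1]
          simp only [pvLines, h1, if_false]
          simp [pvCut, h3, pvG, Bool.or_assoc]
        · simp only [pvScanF, h1, if_false, reduceIte, h3]
          rw [(ih u).2]
          simp [pvLines, h1]

-- B's flag for pattern p, as a per-line any
theorem pvB_flag (p cs : List Char) (hp : p ≠ []) (hlen : p.length ≤ 11) :
    pvScan p false [] cs = (pvLines cs).any (fun l => PySem.Chars.isIn p (pvCut l)) := by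
  have h := pvScan_eq_scanF p hlen cs false []
  simp only [pvWin, List.drop_nil] at h
  rw [h, (pvScanF_lines p hp cs []).1, pvG_nil_eq_isIn _ _ hp]
  exact (pvLines_any cs (fun l => PySem.Chars.isIn p (pvCut l))).symm

-- ===== A-side lemmas =====

-- the per-line test A effectively performs on a line (false on skipped comment lines)
def pvTest (pat : String) (line : String) : Bool :=
  let stripped := PySem.Str.strip line
  if PySem.Str.startswith stripped "#" then false
  else PySem.Str.isIn pat (((PySem.Str.split? stripped "#").getD []).headD "")

theorem pvStepA_eq (st : Bool × Bool × Bool) (line : String) :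
    pvStepA st line = (st.1 || pvTest ".commit()" line,
                       st.2.1 || pvTest ".flush()" line,
                       st.2.2 || pvTest ".rollback()" line) := by
  unfold pvStepA pvTest
  by_cases h : PySem.Str.startswith (PySem.Str.strip line) "#" = true <;>
    simp only [h, if_true, if_false, Bool.false_eq_true] <;> simp [Bool.or_comm]

theorem pvFoldA (lines : List String) (a b c : Bool) :
    lines.foldl pvStepA (a, b, c) =
      (a || lines.any (pvTest ".commit()"),
       b || lines.any (pvTest ".flush()"),
       c || lines.any (pvTest ".rollback()")) := by
  induction lines generalizing a b c with
  | nil => simp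
  | cons l ls ih =>
    simp only [List.foldl_cons, pvStepA_eq, ih, List.any_cons, Bool.or_assoc]

-- padding with characters not occurring in p does not affect infix matches
theorem pvPadL (p a x : List Char) (hp : p ≠ []) (ha : ∀ c ∈ a, c ∉ p) :
    (p <:+: a ++ x) ↔ p <:+: x := by
  induction a with
  | nil => simp
  | cons d a' ih =>
    rw [List.cons_append, List.infix_cons_iff]
    have hd : ¬ p <+: d :: (a' ++ x) := by
      intro hpre
      cases p with
      | nil => exact hp rfl
      | cons e p' =>
        obtain ⟨he, -⟩ := List.cons_prefix_cons.mp hpre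
        exact ha d (by simp) (by simp [← he])
    simp [hd, ih (fun c hc => ha c (List.mem_cons_of_mem _ hc))]

theorem pvPadR (p x b : List Char) (hp : p ≠ []) (hb : ∀ c ∈ b, c ∉ p) :
    (p <:+: x ++ b) ↔ p <:+: x := by
  rw [← List.reverse_infix, List.reverse_append,
    pvPadL p.reverse b.reverse x.reverse (by simpa using hp)
      (fun c hc => by simpa using hb c (by simpa using hc)),
    List.reverse_infix]

-- decomposition of a list around its strip
theorem pvStrip_decomp (m : List Char) :
    ∃ a b, m = a ++ PySem.Chars.strip m ++ b ∧
      (∀ c ∈ a, PySem.Chars.isspace c = true) ∧ (∀ c ∈ b, PySem.Chars.isspace c = true) := by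
  refine ⟨m.takeWhile PySem.Chars.isspace,
    ((PySem.Chars.lstrip m).reverse.takeWhile PySem.Chars.isspace).reverse, ?_, ?_, ?_⟩
  · have h1 : PySem.Chars.strip m ++
        ((PySem.Chars.lstrip m).reverse.takeWhile PySem.Chars.isspace).reverse =
        PySem.Chars.lstrip m := by
      unfold PySem.Chars.strip PySem.Chars.rstrip
      conv_rhs => rw [← List.reverse_reverse (PySem.Chars.lstrip m),
        ← List.takeWhile_append_dropWhile (p := PySem.Chars.isspace)
          (l := (PySem.Chars.lstrip m).reverse)]
      rw [List.reverse_append]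
    rw [List.append_assoc, h1]
    unfold PySem.Chars.lstrip
    exact (List.takeWhile_append_dropWhile).symm
  · exact fun c hc => List.mem_takeWhile_imp hc
  · exact fun c hc => List.mem_takeWhile_imp (by simpa using hc)

-- head of split('#') is the part before the first '#'
theorem pvGoEq0 (sep l cur : List Char) (acc : List (List Char)) :
    PySem.Chars.splitOn.go sep 0 l cur acc = ((cur.reverse ++ l) :: acc).reverse := by
  rw [PySem.Chars.splitOn.go]

theorem pvGoEqNil (sep : List Char) (fuel : Nat) (cur : List Char) (acc : List (List Char)) :
    PySem.Chars.splitOn.go sep (fuel + 1) [] cur acc = (cur.reverse :: acc).reverse := by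
  rw [PySem.Chars.splitOn.go]
  omega

theorem pvGoEqCons (sep : List Char) (fuel : Nat) (c : Char) (rest cur : List Char)
    (acc : List (List Char)) :
    PySem.Chars.splitOn.go sep (fuel + 1) (c :: rest) cur acc =
      if sep.isPrefixOf (c :: rest) then
        PySem.Chars.splitOn.go sep fuel ((c :: rest).drop sep.length) [] (cur.reverse :: acc)
      else PySem.Chars.splitOn.go sep fuel rest (c :: cur) acc := by
  rw [PySem.Chars.splitOn.go]

theorem pvGoAcc (sep : List Char) : ∀ (fuel : Nat) (l cur : List Char) (acc : List (List Char)),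
    PySem.Chars.splitOn.go sep fuel l cur acc =
      acc.reverse ++ PySem.Chars.splitOn.go sep fuel l cur [] := by
  intro fuel
  induction fuel with
  | zero => intro l cur acc; rw [pvGoEq0, pvGoEq0]; simp
  | succ fuel ih =>
    intro l cur acc
    cases l with
    | nil => rw [pvGoEqNil, pvGoEqNil]; simp
    | cons c rest =>
      rw [pvGoEqCons, pvGoEqCons]
      split
      · rw [ih _ _ (cur.reverse :: acc), ih _ _ [cur.reverse]]
        simp
      · rw [ih _ _ acc]

theorem pvGoHead : ∀ (fuel : Nat) (l cur : List Char), l.length < fuel →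
    (PySem.Chars.splitOn.go ['#'] fuel l cur []).headD [] = cur.reverse ++ pvCut l := by
  intro fuel
  induction fuel with
  | zero => intro l cur h; omega
  | succ fuel ih =>
    intro l cur h
    cases l with
    | nil => rw [pvGoEqNil]; simp [pvCut]
    | cons c rest =>
      rw [pvGoEqCons]
      by_cases hc : c = '#'
      · subst hc
        rw [if_pos (by simp), pvGoAcc]
        simp [pvCut]
      · rw [if_neg (fun hpf => hc
            ((List.cons_prefix_cons.mp (List.isPrefixOf_iff_prefix.mp hpf)).1.symm)),
          ih rest (c :: cur) (by simp at h ⊢; omega)]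
        simp [pvCut, hc]

theorem pvSplitOn_head (x : List Char) :
    ((PySem.Chars.splitOn x ['#']).headD []) = pvCut x := by
  unfold PySem.Chars.splitOn
  rw [pvGoHead (x.length + 1) x [] (by omega)]
  simp

-- A's per-line test = membership in the cut of the raw line
theorem pvTest_eq (p : String) (line : String) (hp : p.toList ≠ [])
    (hws : ∀ c ∈ p.toList, PySem.Chars.isspace c = false) :
    pvTest p line = PySem.Chars.isIn p.toList (pvCut line.toList) := by
  obtain ⟨a, b, hm, ha, hb⟩ := pvStrip_decomp line.toList
  have hap : ∀ c ∈ a, c ∉ p.toList :=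
    fun c hc hcp => absurd (ha c hc) (by simp [hws c hcp])
  have hbp : ∀ c ∈ b, c ∉ p.toList :=
    fun c hc hcp => absurd (hb c hc) (by simp [hws c hcp])
  have hsp : PySem.Str.split? (PySem.Str.strip line) "#" =
      some ((PySem.Chars.splitOn (PySem.Str.strip line).toList ['#']).map String.ofList) := by
    simp [PySem.Str.split?, PySem.Chars.split?]
  have hhead : ∀ S : List (List Char), (((S.map String.ofList).headD "")).toList = S.headD [] := by
    intro S; cases S <;> simp
  have hA : pvTest p line = (if PySem.Chars.startswith (PySem.Chars.strip line.toList) ['#']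
      then false else PySem.Chars.isIn p.toList (pvCut (PySem.Chars.strip line.toList))) := by
    simp only [pvTest]
    rw [hsp]
    simp only [Option.getD_some, PySem.Str.startswith_eq, PySem.Str.isIn_eq, hhead,
      pvSplitOn_head, PySem.Str.toList_strip]
    rfl
  have hwsH : ∀ c ∈ a ++ b, (c != '#') = true := by
    intro c hc
    have hsp' : PySem.Chars.isspace c = true := by
      rcases List.mem_append.mp hc with h | h
      · exact ha c h
      · exact hb c h
    have : c ≠ '#' := fun hch => by rw [hch] at hsp'; exact absurd hsp' (by decide)
    simpa using this
  have hcutA : ∀ X, pvCut (a ++ X) = a ++ pvCut X := by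
    intro X
    unfold pvCut
    rw [List.takeWhile_append, if_pos]
    rw [List.takeWhile_eq_self_iff.mpr (fun c hc => hwsH c (List.mem_append.mpr (Or.inl hc)))]
  have hcutm : pvCut line.toList = a ++ pvCut (PySem.Chars.strip line.toList ++ b) := by
    conv_lhs => rw [hm, List.append_assoc]
    rw [hcutA]
  rw [hA, hcutm]
  by_cases hS : PySem.Chars.startswith (PySem.Chars.strip line.toList) ['#'] = true
  · obtain ⟨t, ht⟩ := PySem.Chars.startswith_iff _ _ |>.mp hS
    have hcuthb : pvCut (PySem.Chars.strip line.toList ++ b) = [] := by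
      rw [← ht]
      simp [pvCut]
    rw [if_pos hS, hcuthb, List.append_nil]
    symm
    rw [PySem.Chars.isIn_eq_false_iff]
    intro hinf
    cases hq : p.toList with
    | nil => exact hp hq
    | cons e P' =>
      refine hap e (hinf.subset ?_) (by simp [hq])
      simp [hq]
  · rw [if_neg hS]
    by_cases hall : (List.takeWhile (fun c => c != '#')
        (PySem.Chars.strip line.toList)).length = (PySem.Chars.strip line.toList).length
    · have hcore : pvCut (PySem.Chars.strip line.toList) = PySem.Chars.strip line.toList :=
        (List.takeWhile_prefix _).eq_of_length hall
      have hcutCB : pvCut (PySem.Chars.strip line.toList ++ b) =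
          PySem.Chars.strip line.toList ++ b := by
        unfold pvCut
        rw [List.takeWhile_append, if_pos hall,
          List.takeWhile_eq_self_iff.mpr (fun c hc => hwsH c (List.mem_append.mpr (Or.inr hc)))]
      rw [hcore, hcutCB, Bool.eq_iff_iff, PySem.Chars.isIn_iff_infix, PySem.Chars.isIn_iff_infix,
        pvPadL _ _ _ hp hap, pvPadR _ _ _ hp hbp]
    · have hcutCB : pvCut (PySem.Chars.strip line.toList ++ b) =
          pvCut (PySem.Chars.strip line.toList) := by
        unfold pvCut
        rw [List.takeWhile_append, if_neg hall]
      rw [hcutCB, Bool.eq_iff_iff, PySem.Chars.isIn_iff_infix, PySem.Chars.isIn_iff_infix,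
        pvPadL _ _ _ hp hap]

-- ===== splitlines vs pvLines =====

theorem pvSlGo_nil (isB : Char → Bool) (cur : List Char) (acc : List (List Char)) :
    PySem.Chars.splitlines.go isB [] cur acc =
      if cur.isEmpty then acc.reverse else (cur.reverse :: acc).reverse := by
  rw [PySem.Chars.splitlines.go]

theorem pvSlGo_crlf (isB : Char → Bool) (rest cur : List Char) (acc : List (List Char)) :
    PySem.Chars.splitlines.go isB ('\r' :: '\n' :: rest) cur acc =
      PySem.Chars.splitlines.go isB rest [] (cur.reverse :: acc) := by
  rw [PySem.Chars.splitlines.go]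

theorem pvSlGo_cons (isB : Char → Bool) (x : Char) (rest cur : List Char) (acc : List (List Char))
    (h : ¬(x = '\r' ∧ rest.head? = some '\n')) :
    PySem.Chars.splitlines.go isB (x :: rest) cur acc =
      if isB x then PySem.Chars.splitlines.go isB rest [] (cur.reverse :: acc)
      else PySem.Chars.splitlines.go isB rest (x :: cur) acc := by
  rw [PySem.Chars.splitlines.go]
  intro r2 hx hr
  exact h ⟨hx, by rw [hr]; rfl⟩

-- a character code determines the character
theorem pvCharOfNat (c : Char) (n : Nat) (h : c.toNat = n) (d : Char)
    (hd : d.toNat = n) : c = d := by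
  apply Char.ext
  apply UInt32.toNat_inj.mp
  unfold Char.toNat at h hd
  rw [h, hd]

-- splitlines.go, on Dom characters, computes the per-line any over pvLines
theorem pvSlAny (f : List Char → Bool) (hf : f [] = false) (isB : Char → Bool)
    (hB : ∀ c, pvDomChar c = true → isB c = decide (c = '\n' ∨ c = '\r')) :
    ∀ (n : Nat) (cs : List Char), cs.length ≤ n → (∀ c ∈ cs, pvDomChar c = true) →
      ∀ (cur : List Char) (acc : List (List Char)),
        (PySem.Chars.splitlines.go isB cs cur acc).any f =
          (acc.any f || (f (cur.reverse ++ (pvLines cs).headI) ||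
            (pvLines cs).tail.any f)) := by
  intro n
  induction n with
  | zero =>
    intro cs hlen _ cur acc
    have hcs : cs = [] := List.eq_nil_of_length_eq_zero (Nat.le_zero.mp hlen)
    subst hcs
    rw [pvSlGo_nil]
    cases cur with
    | nil => simp [pvLines, hf]
    | cons d cur' => simp [pvLines, Bool.or_comm]
  | succ n ih =>
    intro cs hlen hdom cur acc
    cases cs with
    | nil =>
      rw [pvSlGo_nil]
      cases cur with
      | nil => simp [pvLines, hf]
      | cons d cur' => simp [pvLines, Bool.or_comm]
    | cons x rest =>
      have hx : pvDomChar x = true := hdom x (by simp)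
      by_cases hcr : x = '\r' ∧ rest.head? = some '\n'
      · obtain ⟨rfl, hhd⟩ := hcr
        cases rest with
        | nil => simp at hhd
        | cons y rest2 =>
          have hy : y = '\n' := by simpa using hhd
          subst hy
          rw [pvSlGo_crlf,
            ih rest2 (by simp at hlen ⊢; omega) (fun c hc => hdom c (by simp [hc])) [] _]
          have h2 : pvLines ('\r' :: '\n' :: rest2) = [] :: [] :: pvLines rest2 := by
            simp [pvLines]
          have hL := (pvLines_any rest2 f).symm
          rw [h2]
          simp [hf, hL, Bool.or_comm, Bool.or_left_comm]
      · rw [pvSlGo_cons isB x rest cur acc hcr, hB x hx]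
        by_cases hbrk : x = '\n' ∨ x = '\r'
        · rw [if_pos (by simpa using hbrk),
            ih rest (by simp at hlen ⊢; omega) (fun c hc => hdom c (by simp [hc])) [] _]
          have h2 : pvLines (x :: rest) = [] :: pvLines rest := by
            simp [pvLines, hbrk]
          have hL := (pvLines_any rest f).symm
          rw [h2]
          simp [hL, Bool.or_comm, Bool.or_left_comm]
        · rw [if_neg (by simpa using hbrk),
            ih rest (by simp at hlen ⊢; omega) (fun c hc => hdom c (by simp [hc])) (x :: cur) acc]
          have h2 : pvLines (x :: rest) = (x :: (pvLines rest).headI) :: (pvLines rest).tail := by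
            simp [pvLines, hbrk]
          rw [h2]
          simp

-- for a Dom character, the break test of splitlines is exactly "is '\n' or '\r'"
theorem pvIsB_dom (c : Char) (hc : pvDomChar c = true) :
    (decide (c.toNat = 10) || decide (c.toNat = 13) || decide (c.toNat = 11) ||
      decide (c.toNat = 12) || decide (c.toNat = 28) || decide (c.toNat = 29) ||
      decide (c.toNat = 30) || decide (c.toNat = 133) || decide (c.toNat = 8232) ||
      decide (c.toNat = 8233)) = decide (c = '\n' ∨ c = '\r') := by
  simp only [pvDomChar, Bool.or_eq_true, Bool.and_eq_true, decide_eq_true_eq, beq_iff_eq] at hc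
  have h10 : c.toNat = 10 → c = '\n' := fun h => pvCharOfNat c 10 h '\n' rfl
  have h13 : c.toNat = 13 → c = '\r' := fun h => pvCharOfNat c 13 h '\r' rfl
  rw [Bool.eq_iff_iff]
  simp only [Bool.or_eq_true, decide_eq_true_eq]
  constructor
  · rintro (((((((((h | h) | h) | h) | h) | h) | h) | h) | h) | h)
    · exact Or.inl (h10 h)
    · exact Or.inr (h13 h)
    all_goals omega
  · rintro (rfl | rfl) <;> simp

-- ===== VERDICT (by name: the statement is the Claim_ definition above) =====
set_option maxRecDepth 8192 in
theorem detect_transaction_usage_spec : Claim_equal_detect_transaction_usage := by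
  intro source hdom
  unfold Spec_detect_transaction_usage detect_transaction_usage detect_transaction_usage_alt
  have hdom' : ∀ c ∈ source.toList, pvDomChar c = true := by
    simpa [Dom_detect_transaction_usage, pvDomStr, List.all_eq_true] using hdom
  have key : ∀ (p : String), p.toList ≠ [] → p.toList.length ≤ 11 →
      (∀ c ∈ p.toList, PySem.Chars.isspace c = false) →
      (PySem.Str.splitlines source).any (pvTest p) = pvScan p.toList false [] source.toList := by
    intro p h1 h2 h3
    have hf : PySem.Chars.isIn p.toList (pvCut []) = false := by
      rw [show pvCut [] = [] from rfl, PySem.Chars.isIn_eq_false_iff]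
      rw [List.infix_nil]
      exact h1
    have hA1 : (PySem.Chars.splitlines source.toList).any
        (fun m => PySem.Chars.isIn p.toList (pvCut m)) =
        (PySem.Str.splitlines source).any (pvTest p) := by
      rw [← PySem.Str.splitlines_map_toList, List.any_map]
      exact PySem.List.any_congr_mem (fun l _ => (pvTest_eq p l h1 h3).symm)
    have hB : ∀ c, pvDomChar c = true →
        (decide (c.toNat = 10) || decide (c.toNat = 13) || decide (c.toNat = 11) ||
          decide (c.toNat = 12) || decide (c.toNat = 28) || decide (c.toNat = 29) ||
          decide (c.toNat = 30) || decide (c.toNat = 133) || decide (c.toNat = 8232) ||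
          decide (c.toNat = 8233)) = decide (c = '\n' ∨ c = '\r') :=
      fun c hc => pvIsB_dom c hc
    have hGo : (PySem.Chars.splitlines source.toList).any
        (fun m => PySem.Chars.isIn p.toList (pvCut m)) =
        (pvLines source.toList).any (fun m => PySem.Chars.isIn p.toList (pvCut m)) := by
      unfold PySem.Chars.splitlines
      rw [pvSlAny (fun m => PySem.Chars.isIn p.toList (pvCut m)) hf _ hB
        source.toList.length source.toList le_rfl hdom' [] []]
      rw [pvLines_any source.toList]
      simp
    rw [← hA1, hGo, pvB_flag p.toList source.toList h1 h2]
  have hnws : ∀ (p : String), (p.toList.all (fun c => PySem.Chars.isspace c == false)) = true →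
      ∀ c ∈ p.toList, PySem.Chars.isspace c = false := by
    intro p h c hc
    simpa using (List.all_eq_true.mp h c hc)
  rw [pvFoldA, pvFoldB]
  simp only [Bool.false_or]
  rw [key ".commit()" (by decide) (by decide) (hnws _ rfl),
    key ".flush()" (by decide) (by decide) (hnws _ rfl),
    key ".rollback()" (by decide) (by decide) (hnws _ rfl)]
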